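-- pv_equiv track=rewrite | github.com/dynamik-dev/bully | pipeline/pipeline.py | _unescape_double_quoted
-- ===== SOURCE A (Python) =====
-- _DOUBLE_QUOTED_ESCAPES: dict[str, str] = {
--     "\\": "\\",
--     '"': '"',
--     "n": "\n",
--     "t": "\t",
--     "r": "\r",
--     "/": "/",
--     "0": "\x00",
-- }
--
-- def _unescape_double_quoted(inner: str) -> str:
--     """Apply YAML double-quoted escape processing to the inside of a scalar.
--
--     Only the subset listed in `_DOUBLE_QUOTED_ESCAPES` is collapsed. Unknown
--     sequences (e.g. `\\z`) are kept literally -- we preserve the backslash and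
--     the following character rather than raising, so rule authors can use
--     backslash-heavy regex patterns without the parser throwing at config load.
--     A trailing lone backslash is also kept literally.
--     """
--     if "\\" not in inner:
--         return inner
--     out: list[str] = []
--     i = 0
--     n = len(inner)
--     while i < n:
--         ch = inner[i]
--         if ch == "\\" and i + 1 < n:
--             nxt = inner[i + 1]
--             mapped = _DOUBLE_QUOTED_ESCAPES.get(nxt)
--             if mapped is not None:
--                 out.append(mapped)
--             else:
--                 out.append(ch)
--                 out.append(nxt)
--             i += 2
--             continue
--         out.append(ch)
--         i += 1
--     return "".join(out)
-- ===== SOURCE B (Python) =====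
-- import re
--
-- _DOUBLE_QUOTED_ESCAPES: dict[str, str] = {
--     "\\": "\\",
--     '"': '"',
--     "n": "\n",
--     "t": "\t",
--     "r": "\r",
--     "/": "/",
--     "0": "\x00",
-- }
--
--
-- def _unescape_double_quoted(inner: str) -> str:
--     """Single regex pass: each non-overlapping `\\<char>` pair is replaced at once.
--
--     A function replacer keeps mapped backslashes literal, and `[\\s\\S]` makes a
--     backslash before a newline behave exactly like the manual scanner; a trailing
--     lone backslash never matches and stays literal.
--     """
--     return re.sub(
--         r"\\([\s\S])",
--         lambda m: _DOUBLE_QUOTED_ESCAPES.get(m.group(1), "\\" + m.group(1)),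
--         inner,
--     )
-- ===== Notes on version B (the rewrite author's own statement) =====
-- stated objective: idiomatic
-- what changed: Replaced the hand-written index-tracking while-loop scanner (with its explicit early-return substring check and string-list accumulator) by a single re.sub call whose function replacer maps each non-overlapping backslash pair through the escape table.
import Mathlib
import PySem

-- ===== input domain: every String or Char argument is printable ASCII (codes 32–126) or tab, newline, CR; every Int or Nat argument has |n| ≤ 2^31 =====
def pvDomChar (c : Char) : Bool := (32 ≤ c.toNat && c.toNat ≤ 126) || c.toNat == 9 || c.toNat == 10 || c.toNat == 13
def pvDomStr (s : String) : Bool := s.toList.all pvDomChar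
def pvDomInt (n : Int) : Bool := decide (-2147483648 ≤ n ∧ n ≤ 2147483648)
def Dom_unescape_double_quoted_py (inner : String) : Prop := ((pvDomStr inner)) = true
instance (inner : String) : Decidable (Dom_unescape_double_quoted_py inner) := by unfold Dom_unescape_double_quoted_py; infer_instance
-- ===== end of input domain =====

-- B replaces A's manual index-scanning while-loop with a single regex-substitution
-- pass (re.sub on non-overlapping `\<char>` pairs); equal return values, no speed claim.

-- ===== PORT A =====
-- the module constant _DOUBLE_QUOTED_ESCAPES (a Python dict with string keys/values)
def pvEscDict : PySem.Dict String String :=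
  PySem.Dict.ofList
    [("\\", "\\"), ("\"", "\""), ("n", "\n"), ("t", "\t"), ("r", "\r"), ("/", "/"),
     ("0", String.ofList [Char.ofNat 0])]

-- A's while-loop: `i` only moves forward by 1 or 2 and the loop reads inner[i] / inner[i+1],
-- so the loop over index i on `inner` IS this recursion over the remaining characters;
-- `out` is A's list of strings, joined at the end.
def pvALoop : List Char → List String
  | [] => []                     -- i = n: loop ends
  | ch :: rest =>
    if ch = '\\' then
      match rest with
      | nxt :: rest2 =>          -- ch == "\\" and i+1 < n
        match pvEscDict.get? (String.ofList [nxt]) with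
        | some m => m :: pvALoop rest2                                      -- out.append(mapped)
        | none => String.ofList [ch] :: String.ofList [nxt] :: pvALoop rest2 -- keep both
      | [] => String.ofList [ch] :: pvALoop []   -- i+1 == n: falls through to out.append(ch)
    else String.ofList [ch] :: pvALoop rest      -- out.append(ch); i += 1

def unescape_double_quoted_py (inner : String) : String :=
  if PySem.Str.isIn "\\" inner = false then inner   -- if "\\" not in inner: return inner
  else PySem.Str.join "" (pvALoop inner.toList)     -- "".join(out)

-- ===== PORT B =====
-- _DOUBLE_QUOTED_ESCAPES.get(m.group(1)) on the literal dict, rendered as a Char table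
-- (all keys and values are single characters).
def pvEscChar : Char → Option (List Char)
  | '\\' => some ['\\']
  | '"' => some ['"']
  | 'n' => some ['\n']
  | 't' => some ['\t']
  | 'r' => some ['\r']
  | '/' => some ['/']
  | '0' => some [Char.ofNat 0]
  | _ => none

-- re.sub(r"\\([\s\S])", repl, inner): the regex engine scans left to right, replacing each
-- non-overlapping `\<char>` pair by repl (the mapped string, else "\\" + char) and copying
-- every other character; a trailing lone backslash never matches. Exact transcription of
-- that scan (the pattern matches any two chars starting with '\').
def pvBScan : List Char → List Char
  | '\\' :: c :: rest =>
      (match pvEscChar c with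
       | some m => m
       | none => ['\\', c]) ++ pvBScan rest
  | c :: rest => c :: pvBScan rest
  | [] => []

def unescape_double_quoted_py_alt (inner : String) : String :=
  String.ofList (pvBScan inner.toList)

-- ===== PRECONDITION & SPEC =====
def Spec_unescape_double_quoted_py (inner : String) (out : String) : Prop := out = unescape_double_quoted_py_alt inner
instance (inner : String) (out : String) : Decidable (Spec_unescape_double_quoted_py inner out) := by unfold Spec_unescape_double_quoted_py; infer_instance

-- ===== CLAIM (what is proved, stated in full; the proofs are below) =====
def Claim_equal_unescape_double_quoted_py : Prop := ∀ (inner : String), Dom_unescape_double_quoted_py inner → Spec_unescape_double_quoted_py inner (unescape_double_quoted_py inner)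

-- ===== LEMMAS AND PROOFS =====

-- the String-keyed dict lookup of A agrees with B's Char table
set_option maxRecDepth 4096 in
lemma pvEscDict_get_eq (c : Char) :
    pvEscDict.get? (String.ofList [c]) = Option.map String.ofList (pvEscChar c) := by
  by_cases h1 : c = '\\'; · subst h1; decide
  by_cases h2 : c = '"'; · subst h2; decide
  by_cases h3 : c = 'n'; · subst h3; decide
  by_cases h4 : c = 't'; · subst h4; decide
  by_cases h5 : c = 'r'; · subst h5; decide
  by_cases h6 : c = '/'; · subst h6; decide
  by_cases h7 : c = '0'; · subst h7; decide
  have hb : pvEscChar c = none := by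
    rw [pvEscChar.eq_def]; split <;> simp_all
  rw [hb]
  have hd : pvEscDict = PySem.Dict.mk
      [("\\", "\\"), ("\"", "\""), ("n", "\n"), ("t", "\t"), ("r", "\r"), ("/", "/"),
       ("0", String.ofList [Char.ofNat 0])] := by decide
  have k1 : ("\\" : String) = String.ofList ['\\'] := rfl
  have k2 : ("\"" : String) = String.ofList ['"'] := rfl
  have k3 : ("n" : String) = String.ofList ['n'] := rfl
  have k4 : ("t" : String) = String.ofList ['t'] := rfl
  have k5 : ("r" : String) = String.ofList ['r'] := rfl
  have k6 : ("/" : String) = String.ofList ['/'] := rfl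
  have k7 : ("0" : String) = String.ofList ['0'] := rfl
  have gkey : ∀ k : Char, ¬ c = k → ((String.ofList [k] : String) == String.ofList [c]) = false := by
    intro k hk
    simp only [beq_eq_false_iff_ne, ne_eq, String.ofList_inj, List.cons.injEq, and_true]
    exact fun e => hk e.symm
  rw [hd]
  simp only [PySem.Dict.get?_mk_cons, k1, k2, k3, k4, k5, k6, k7,
    gkey _ h1, gkey _ h2, gkey _ h3, gkey _ h4, gkey _ h5, gkey _ h6, gkey _ h7,
    Bool.false_eq_true, if_false, Option.map_none]
  rfl

lemma join_nil_cons (x : List Char) (xs : List (List Char)) :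
    PySem.Chars.join [] (x :: xs) = x ++ PySem.Chars.join [] xs := by
  cases xs <;> simp [PySem.Chars.join_singleton, PySem.Chars.join_cons_cons, PySem.Chars.join_nil]

-- A's joined output has the same characters as B's scan, on every character list
lemma aLoop_eq_bScan (l : List Char) :
    PySem.Chars.join [] ((pvALoop l).map String.toList) = pvBScan l := by
  induction l using pvBScan.induct with
  | case1 c rest ih =>
    rw [pvALoop, pvBScan]
    simp only [pvEscDict_get_eq c]
    cases h : pvEscChar c with
    | some m => simp [join_nil_cons, ih]
    | none => simp [join_nil_cons, ih]
  | case2 c rest h ih =>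
    rw [pvALoop.eq_def]
    by_cases hc : c = '\\'
    · subst hc
      cases rest with
      | nil => simp [pvALoop, pvBScan, PySem.Chars.join_singleton]
      | cons y t => exact (h y t rfl rfl).elim
    · have hb : pvBScan (c :: rest) = c :: pvBScan rest := by
        cases rest <;> rw [pvBScan.eq_def]
        · simp
        · simp [hc]
      dsimp only
      rw [if_neg hc, hb]
      simp [join_nil_cons, ih]
  | case3 => simp [pvALoop, pvBScan, PySem.Chars.join_nil]

-- with no backslash the scan copies the string unchanged
lemma bScan_id (l : List Char) (h : '\\' ∉ l) : pvBScan l = l := by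
  induction l with
  | nil => rfl
  | cons c rest ih =>
    have hc : c ≠ '\\' := by intro e; exact h (e ▸ List.mem_cons_self ..)
    have hr : '\\' ∉ rest := fun m => h (List.mem_cons_of_mem _ m)
    cases rest with
    | nil => simp [pvBScan]
    | cons y t =>
      rw [pvBScan.eq_def]; simp [hc, ih hr]

-- ===== VERDICT (by name: the statement is the Claim_ definition above) =====
theorem unescape_double_quoted_py_spec : Claim_equal_unescape_double_quoted_py := by
  intro inner _
  unfold Spec_unescape_double_quoted_py unescape_double_quoted_py unescape_double_quoted_py_alt
  have ebs : ("\\" : String).toList = ['\\'] := by decide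
  by_cases h : PySem.Str.isIn "\\" inner = false
  · rw [if_pos h]
    have hnin : '\\' ∉ inner.toList := by
      intro hm
      have hin : ("\\" : String).toList <:+: inner.toList := by
        obtain ⟨p, q, hpq⟩ := List.mem_iff_append.mp hm
        exact ⟨p, q, by rw [hpq, ebs]; simp⟩
      have hyes := (PySem.Str.isIn_iff_infix "\\" inner).mpr hin
      simp only [PySem.Str.isIn_eq, ebs] at hyes
      simp [hyes] at h
    rw [bScan_id _ hnin]
    simp
  · rw [if_neg h]
    apply String.toList_inj.mp
    have e0 : ("" : String).toList = ([] : List Char) := by decide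
    rw [PySem.Str.toList_join, e0, aLoop_eq_bScan]
    simp
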